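-- pv_equiv track=rewrite | github.com/rodrigolsouza/Maratona-Programacao | LAB_PROGRAMAÇÃO/src/E6_Ortografia_funcionando.py | corretor
-- ===== SOURCE A (Python) =====
-- def corretor(s1,s2):
--     matriz= [None]*(len(s2)+1)
--     for a in range(len(s2)+1):
--         matriz[a]=[0]*(len(s1)+1)
--     for b in range(1, len(s2)+1):
--         matriz[b][0] = b
--     for c in range(1,len(s1)+1):
--         matriz[0][c]=c
--
--     for i in range(1,len(s2)+1):
--         for j in range(1,len(s1)+1):
--             if s1[j-1]==s2[i-1]:
--                 distancia=0
--             else: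
--                 distancia=1
--             matriz[i][j]=min(matriz[i-1][j-1]+distancia,matriz[i][j-1]+1,matriz[i-1][j]+1)
--     if matriz[i][j] <= 2:
--         return s2 + ' '
--     return ''
-- ===== SOURCE B (Python) =====
-- def corretor(s1, s2):
--     # Only "distance <= 2?" matters: reject by length gap, then a budgeted
--     # recursive check (at most 3^2 branches, each walking matching suffixes).
--     if abs(len(s1) - len(s2)) > 2:
--         return ''
--
--     def within(i, j, k):
--         # is the edit distance between s1[:i] and s2[:j] at most k?
--         while i and j and s1[i - 1] == s2[j - 1]:
--             i -= 1
--             j -= 1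
--         if not i:
--             return j <= k
--         if not j:
--             return i <= k
--         if not k:
--             return False
--         return (within(i - 1, j - 1, k - 1)
--                 or within(i, j - 1, k - 1)
--                 or within(i - 1, j, k - 1))
--
--     return s2 + ' ' if within(len(s1), len(s2), 2) else ''
-- ===== Notes on version B (the rewrite author's own statement) =====
-- stated objective: faster
-- what changed: B never builds the DP matrix: it rejects when the length gap exceeds 2, and otherwise decides 'edit distance <= 2' with a depth-2 budgeted recursion (at most 3^2 branches) that skips matching suffixes in a linear scan, instead of A's full (len(s2)+1)x(len(s1)+1) Wagner-Fischer table.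
import Mathlib
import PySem

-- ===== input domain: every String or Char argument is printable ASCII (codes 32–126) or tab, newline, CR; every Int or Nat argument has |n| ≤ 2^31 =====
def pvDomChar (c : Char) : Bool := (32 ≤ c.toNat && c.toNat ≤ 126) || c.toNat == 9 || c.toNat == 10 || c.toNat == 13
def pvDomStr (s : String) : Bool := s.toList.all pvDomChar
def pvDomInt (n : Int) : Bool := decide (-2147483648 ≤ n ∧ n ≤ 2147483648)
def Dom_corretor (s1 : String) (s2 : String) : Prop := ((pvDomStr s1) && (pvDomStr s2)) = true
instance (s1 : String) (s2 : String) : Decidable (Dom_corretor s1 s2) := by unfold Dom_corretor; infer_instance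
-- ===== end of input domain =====

-- B never builds the DP matrix: it rejects when the length gap exceeds 2 and otherwise
-- decides "edit distance ≤ 2" by a depth-2 budgeted recursion that skips matching
-- suffixes, instead of A's full (len(s2)+1)×(len(s1)+1) Wagner–Fischer table.

-- ===== PORT A =====
def corretor (s1 : String) (s2 : String) : String :=
  let l1 := s1.toList
  let l2 := s2.toList
  let n1 := l1.length
  let n2 := l2.length
  let matriz : List (List Int) :=
    (List.range (n2+1)).foldl (fun m a => m.set a (List.replicate (n1+1) (0:Int)))
      (List.replicate (n2+1) ([] : List Int))
  let matriz := (List.range' 1 n2).foldl (fun m b => m.set b ((m.getD b []).set 0 (b:Int))) matriz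
  let matriz := (List.range' 1 n1).foldl (fun m c => m.set 0 ((m.getD 0 []).set c (c:Int))) matriz
  let matriz := (List.range' 1 n2).foldl (fun m i =>
    (List.range' 1 n1).foldl (fun m j =>
      let distancia : Int := if l1.getD (j-1) default = l2.getD (i-1) default then 0 else 1
      let v := min (min ((m.getD (i-1) []).getD (j-1) 0 + distancia)
                        ((m.getD i []).getD (j-1) 0 + 1))
                   ((m.getD (i-1) []).getD j 0 + 1)
      m.set i ((m.getD i []).set j v)) m) matriz
  if (matriz.getD n2 []).getD n1 0 ≤ 2 then s2 ++ " " else ""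

-- ===== PORT B =====
-- the 'while i and j and s1[i-1] == s2[j-1]: i -= 1; j -= 1' loop of Source B
def pvStrip (l1 l2 : List Char) : Nat → Nat → Nat × Nat
  | i+1, j+1 => if l1.getD i default = l2.getD j default then pvStrip l1 l2 i j else (i+1, j+1)
  | i, j => (i, j)

-- termination helper for pvWithin (cited in its decreasing_by)
theorem pvStrip_le (l1 l2 : List Char) :
    ∀ i j, (pvStrip l1 l2 i j).1 ≤ i ∧ (pvStrip l1 l2 i j).2 ≤ j := by
  intro i
  induction i with
  | zero => intro j; simp [pvStrip]
  | succ i ih =>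
    intro j
    cases j with
    | zero => simp [pvStrip]
    | succ j =>
      simp only [pvStrip]
      split_ifs with h
      · have := ih j; omega
      · simp

-- Source B's 'within(i, j, k)': is the edit distance of s1[:i] and s2[:j] at most k?
def pvWithin (l1 l2 : List Char) (i j : Nat) (k : Int) : Bool :=
  let p := pvStrip l1 l2 i j
  if p.1 = 0 then decide ((p.2 : Int) ≤ k)
  else if p.2 = 0 then decide ((p.1 : Int) ≤ k)
  else if k = 0 then false
  else pvWithin l1 l2 (p.1 - 1) (p.2 - 1) (k - 1) ||
       pvWithin l1 l2 p.1 (p.2 - 1) (k - 1) ||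
       pvWithin l1 l2 (p.1 - 1) p.2 (k - 1)
termination_by i + j
decreasing_by
  all_goals (have h := pvStrip_le l1 l2 i j; simp only [p] at *; omega)

def corretor_alt (s1 : String) (s2 : String) : String :=
  let l1 := s1.toList
  let l2 := s2.toList
  if 2 < ((l1.length : Int) - (l2.length : Int)).natAbs then ""
  else if pvWithin l1 l2 l1.length l2.length 2 then s2 ++ " " else ""

-- ===== PRECONDITION & SPEC =====
-- Pre_ excludes exactly the inputs where A raises: if either string is empty the final
-- 'matriz[i][j]' reads loop variables i, j that were never bound (NameError).
def Pre_corretor (s1 : String) (s2 : String) : Prop := s1 ≠ "" ∧ s2 ≠ ""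
instance (s1 : String) (s2 : String) : Decidable (Pre_corretor s1 s2) := by unfold Pre_corretor; infer_instance
def pvWitness_corretor : String × String := ("abc", "abd")

def Spec_corretor (s1 : String) (s2 : String) (out : String) : Prop := out = corretor_alt s1 s2
instance (s1 : String) (s2 : String) (out : String) : Decidable (Spec_corretor s1 s2 out) := by unfold Spec_corretor; infer_instance

-- ===== CLAIM (what is proved, stated in full; the proofs are below) =====
def Claim_equal_corretor : Prop := ∀ (s1 : String) (s2 : String), Dom_corretor s1 s2 → Pre_corretor s1 s2 → Spec_corretor s1 s2 (corretor s1 s2)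

-- ===== LEMMAS AND PROOFS =====

-- the Wagner–Fischer cell value A's matrix holds, and row i of that table
def pvCell (l1 l2 : List Char) : Nat → Nat → Int
  | 0, j => (j : Int)
  | i+1, 0 => ((i+1 : Nat) : Int)
  | i+1, j+1 =>
      min (min (pvCell l1 l2 i j + (if l1.getD j default = l2.getD i default then 0 else 1))
               (pvCell l1 l2 (i+1) j + 1))
          (pvCell l1 l2 i (j+1) + 1)

def pvRow (l1 l2 : List Char) (i : Nat) : List Int :=
  (List.range' 0 (l1.length + 1)).map (pvCell l1 l2 i)

theorem pvCell_zero_right (l1 l2 : List Char) (i : Nat) : pvCell l1 l2 i 0 = (i : Int) := by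
  cases i <;> simp [pvCell]

theorem pvCell_zero_left (l1 l2 : List Char) (j : Nat) : pvCell l1 l2 0 j = (j : Int) := by
  simp [pvCell]

-- init fold: overwriting every entry of m with r gives replicate
theorem pv_set_map_shift {α : Type} (r : α) :
    ∀ (l : List Nat) (x : α) (xs : List α),
    (l.map (·+1)).foldl (fun m a => m.set a r) (x :: xs) = x :: l.foldl (fun m a => m.set a r) xs := by
  intro l
  induction l with
  | nil => intro x xs; simp
  | cons a l ih => intro x xs; simp only [List.map_cons, List.foldl_cons, List.set_cons_succ]; exact ih x _

theorem pv_init_fold {α : Type} (r : α) :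
    ∀ (m : List α), (List.range m.length).foldl (fun m a => m.set a r) m = List.replicate m.length r := by
  intro m
  induction m with
  | nil => simp
  | cons x xs ih =>
    rw [List.length_cons, List.range_succ_eq_map, List.foldl_cons, List.set_cons_zero,
      pv_set_map_shift, ih, List.replicate_succ]

-- border fold: rows s..s+n-1 each updated from z by u
theorem pv_fold_rowupd {α : Type} (dflt z : α) (u : Nat → α → α) :
    ∀ (n s : Nat) (front : List α), front.length = s →
    (List.range' s n).foldl (fun m b => m.set b (u b (m.getD b dflt))) (front ++ List.replicate n z)
    = front ++ (List.range' s n).map (fun b => u b z) := by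
  intro n
  induction n with
  | zero => intro s front _; simp
  | succ n ih =>
    intro s front hf
    rw [List.range'_succ, List.foldl_cons, List.replicate_succ]
    have hget : ((front ++ z :: List.replicate n z).getD s dflt) = z := by
      rw [List.getD_append_right _ _ _ _ (by omega), hf]
      simp
    have hset : (front ++ z :: List.replicate n z).set s (u s z)
        = (front ++ [u s z]) ++ List.replicate n z := by
      rw [List.set_append_right _ _ (by omega), hf]
      simp
    rw [hget, hset]
    rw [ih (s+1) (front ++ [u s z]) (by simp [hf])]
    simp [List.map_cons]

theorem pv_getD_set_ne {α : Type} (l : List α) (n m : Nat) (a d : α) (h : n ≠ m) :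
    (l.set n a).getD m d = l.getD m d := by
  simp [List.getD, List.getElem?_set_ne h]

theorem pv_getD_set_self {α : Type} (l : List α) (n : Nat) (a d : α) (h : n < l.length) :
    (l.set n a).getD n d = a := by
  simp [List.getD, h]

theorem pv_set_getD_self {α : Type} (l : List α) (n : Nat) (d : α) (h : n < l.length) :
    l.set n (l.getD n d) = l := by
  rw [List.getD_eq_getElem _ _ h]; exact List.set_getElem_self h

theorem pv_getD_map_range' {α : Type} (f : Nat → α) (d : α) (n k : Nat) (h : k < n) :
    (((List.range' 0 n).map f).getD k d) = f k := by
  rw [List.getD_eq_getElem _ _ (by simpa using h)]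
  simp

theorem pv_fold_head :
    ∀ (l : List Nat) (x : List Int) (xs : List (List Int)),
    l.foldl (fun m c => m.set 0 ((m.getD 0 []).set c (c:Int))) (x :: xs)
    = l.foldl (fun r c => r.set c (c:Int)) x :: xs := by
  intro l
  induction l with
  | nil => intro x xs; rfl
  | cons c l ih =>
    intro x xs
    simp only [List.foldl_cons, List.getD_cons_zero, List.set_cons_zero]
    exact ih _ _

theorem pv_row0_fold : ∀ (n k : Nat),
    (List.range' (k+1) n).foldl (fun r c => r.set c (c:Int))
      ((List.range' 0 (k+1)).map (fun (c : Nat) => (c:Int)) ++ List.replicate n 0)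
    = (List.range' 0 (k+1+n)).map (fun (c : Nat) => (c:Int)) := by
  intro n
  induction n with
  | zero => intro k; simp
  | succ n ih =>
    intro k
    rw [show List.range' (k+1) (n+1) = (k+1) :: List.range' (k+1+1) n from List.range'_succ,
        List.foldl_cons, List.replicate_succ]
    have hset : ((List.range' 0 (k+1)).map (fun (c : Nat) => (c:Int)) ++ (0:Int) :: List.replicate n 0).set (k+1) ((k+1:Nat) : Int)
        = (List.range' 0 (k+1+1)).map (fun (c : Nat) => (c:Int)) ++ List.replicate n 0 := by
      rw [show List.range' 0 (k+1+1) = List.range' 0 (k+1) ++ [0+(k+1)] from List.range'_1_concat,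
          List.map_append, List.append_assoc, List.set_append_right _ _ (by simp)]
      simp
    rw [hset, ih (k+1)]
    have h2 : k+1+1+n = k+1+(n+1) := by omega
    rw [h2]

theorem pv_inner_lift (l1 l2 : List Char) (i : Nat) (hi : 0 < i) :
    ∀ (js : List Nat) (m : List (List Int)), i < m.length →
    js.foldl (fun m j =>
        m.set i ((m.getD i []).set j
          (min (min ((m.getD (i-1) []).getD (j-1) 0 +
                      if l1.getD (j-1) default = l2.getD (i-1) default then 0 else 1)
                    ((m.getD i []).getD (j-1) 0 + 1))
               ((m.getD (i-1) []).getD j 0 + 1)))) m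
    = m.set i (js.foldl (fun r j =>
        r.set j
          (min (min ((m.getD (i-1) []).getD (j-1) 0 +
                      if l1.getD (j-1) default = l2.getD (i-1) default then 0 else 1)
                    (r.getD (j-1) 0 + 1))
               ((m.getD (i-1) []).getD j 0 + 1))) (m.getD i [])) := by
  intro js
  induction js with
  | nil => intro m hm; exact (pv_set_getD_self m i [] hm).symm
  | cons j js ih =>
    intro m hm
    simp only [List.foldl_cons]
    rw [ih (m.set i _) (by simpa using hm)]
    rw [List.set_set]
    have h1 : ∀ (x : List Int), (m.set i x).getD (i-1) [] = m.getD (i-1) [] := by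
      intro x; exact pv_getD_set_ne _ _ _ _ _ (by omega)
    have h2 : ∀ (x : List Int), (m.set i x).getD i [] = x := by
      intro x; exact pv_getD_set_self _ _ _ _ hm
    simp only [h1, h2]

theorem pv_rowfold (l1 l2 : List Char) (i : Nat) :
    ∀ (n k : Nat), k + n = l1.length →
    (List.range' (k+1) n).foldl (fun r j =>
        r.set j
          (min (min ((pvRow l1 l2 i).getD (j-1) 0 +
                      if l1.getD (j-1) default = l2.getD i default then 0 else 1)
                    (r.getD (j-1) 0 + 1))
               ((pvRow l1 l2 i).getD j 0 + 1)))
      ((List.range' 0 (k+1)).map (pvCell l1 l2 (i+1)) ++ List.replicate n 0)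
    = (List.range' 0 (l1.length+1)).map (pvCell l1 l2 (i+1)) := by
  intro n
  induction n with
  | zero =>
    intro k hk
    simp only [Nat.add_zero] at hk
    subst hk
    simp
  | succ n ih =>
    intro k hk
    rw [show List.range' (k+1) (n+1) = (k+1) :: List.range' (k+1+1) n from List.range'_succ,
        List.foldl_cons, List.replicate_succ]
    have hr1 : ((List.range' 0 (k+1)).map (pvCell l1 l2 (i+1)) ++ (0:Int) :: List.replicate n 0).getD ((k+1)-1) 0
        = pvCell l1 l2 (i+1) k := by
      rw [Nat.add_sub_cancel, List.getD_append _ _ _ _ (by simp)]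
      exact pv_getD_map_range' _ _ _ _ (by omega)
    have hp1 : (pvRow l1 l2 i).getD ((k+1)-1) 0 = pvCell l1 l2 i k := by
      rw [Nat.add_sub_cancel, pvRow]; exact pv_getD_map_range' _ _ _ _ (by omega)
    have hp2 : (pvRow l1 l2 i).getD (k+1) 0 = pvCell l1 l2 i (k+1) := by
      rw [pvRow]; exact pv_getD_map_range' _ _ _ _ (by omega)
    rw [hr1, hp1, hp2]
    have hv : min (min (pvCell l1 l2 i k +
            if l1.getD ((k+1)-1) default = l2.getD i default then (0:Int) else 1)
          (pvCell l1 l2 (i+1) k + 1)) (pvCell l1 l2 i (k+1) + 1) = pvCell l1 l2 (i+1) (k+1) := by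
      rw [Nat.add_sub_cancel]
      conv_rhs => rw [pvCell]
    rw [hv]
    have hset : ((List.range' 0 (k+1)).map (pvCell l1 l2 (i+1)) ++ (0:Int) :: List.replicate n 0).set (k+1)
          (pvCell l1 l2 (i+1) (k+1))
        = (List.range' 0 (k+1+1)).map (pvCell l1 l2 (i+1)) ++ List.replicate n 0 := by
      rw [show List.range' 0 (k+1+1) = List.range' 0 (k+1) ++ [0+(k+1)] from List.range'_1_concat,
          List.map_append, List.append_assoc, List.set_append_right _ _ (by simp)]
      simp
    rw [hset, ih (k+1) (by omega)]

theorem pv_outer (l1 l2 : List Char) :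
    ∀ (t i : Nat), i + t = l2.length →
    (List.range' (i+1) t).foldl (fun m i =>
        (List.range' 1 l1.length).foldl (fun m j =>
          m.set i ((m.getD i []).set j
            (min (min ((m.getD (i-1) []).getD (j-1) 0 +
                        if l1.getD (j-1) default = l2.getD (i-1) default then 0 else 1)
                      ((m.getD i []).getD (j-1) 0 + 1))
                 ((m.getD (i-1) []).getD j 0 + 1)))) m)
      ((List.range' 0 (i+1)).map (pvRow l1 l2) ++
        (List.range' (i+1) t).map (fun (b : Nat) => (b:Int) :: List.replicate l1.length 0))
    = (List.range' 0 (l2.length+1)).map (pvRow l1 l2) := by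
  intro t
  induction t with
  | zero =>
    intro i hi
    simp only [Nat.add_zero] at hi
    subst hi
    simp
  | succ t ih =>
    intro i hi
    rw [show List.range' (i+1) (t+1) = (i+1) :: List.range' (i+1+1) t from List.range'_succ,
        List.map_cons, List.foldl_cons]
    set front := (List.range' 0 (i+1)).map (pvRow l1 l2) with hfront
    set rest := (List.range' (i+1+1) t).map (fun (b : Nat) => (b:Int) :: List.replicate l1.length 0) with hrest
    set m := front ++ (((i+1 : Nat):Int) :: List.replicate l1.length 0) :: rest with hm
    have hflen : front.length = i + 1 := by simp [hfront]
    have hmlen : i + 1 < m.length := by simp [hm, hflen]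
    rw [pv_inner_lift l1 l2 (i+1) (by omega) _ m hmlen]
    have hprev : m.getD ((i+1)-1) [] = pvRow l1 l2 i := by
      rw [Nat.add_sub_cancel, hm, List.getD_append _ _ _ _ (by omega), hfront]
      exact pv_getD_map_range' _ _ _ _ (by omega)
    have hcur : m.getD (i+1) [] = ((i+1 : Nat):Int) :: List.replicate l1.length 0 := by
      rw [hm, List.getD_append_right _ _ _ _ (by omega), hflen]
      simp
    rw [hprev, hcur]
    simp only [Nat.add_sub_cancel]
    have hstart : ((i+1 : Nat):Int) :: List.replicate l1.length 0
        = (List.range' 0 1).map (pvCell l1 l2 (i+1)) ++ List.replicate l1.length 0 := by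
      simp [List.range'_succ, pvCell_zero_right]
    rw [hstart]
    have hrf := pv_rowfold l1 l2 i l1.length 0 (by omega)
    simp only [Nat.zero_add] at hrf
    rw [hrf, ← pvRow]
    have hset : m.set (i+1) (pvRow l1 l2 (i+1)) = ((List.range' 0 (i+1+1)).map (pvRow l1 l2)) ++ rest := by
      rw [hm, List.set_append_right _ _ (by omega),
          show List.range' 0 (i+1+1) = List.range' 0 (i+1) ++ [0+(i+1)] from List.range'_1_concat,
          List.map_append, List.append_assoc, hflen]
      simp [hfront]
    rw [hset, hrest]
    exact ih (i+1) (by omega)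

theorem corretor_eq_cell (s1 s2 : String) :
    corretor s1 s2 =
      if pvCell s1.toList s2.toList s2.toList.length s1.toList.length ≤ 2 then s2 ++ " " else "" := by
  simp only [corretor]
  set l1 := s1.toList with hl1
  set l2 := s2.toList with hl2
  set Z := List.replicate (l1.length + 1) (0:Int) with hZ
  have h1 := pv_init_fold Z (List.replicate (l2.length+1) ([] : List Int))
  rw [List.length_replicate] at h1
  rw [h1]
  rw [show List.replicate (l2.length+1) Z = [Z] ++ List.replicate l2.length Z by
        simp [List.replicate_succ]]
  rw [pv_fold_rowupd ([] : List Int) Z (fun (b : Nat) z => z.set 0 (b:Int)) l2.length 1 [Z] rfl]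
  have h3 : (List.range' 1 l2.length).map (fun (b : Nat) => Z.set 0 (b:Int))
      = (List.range' 1 l2.length).map (fun (b : Nat) => (b:Int) :: List.replicate l1.length 0) :=
    List.map_congr_left (fun b _ => by rw [hZ]; simp [List.replicate_succ])
  rw [h3]
  rw [List.singleton_append, pv_fold_head]
  rw [show Z = (List.range' 0 1).map (fun (c : Nat) => (c:Int)) ++ List.replicate l1.length 0 by
        rw [hZ]; simp [List.replicate_succ, List.range'_one]]
  have h5 := pv_row0_fold l1.length 0
  rw [show (0:Nat)+1+l1.length = l1.length+1 from by omega] at h5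
  simp only [Nat.zero_add] at h5
  rw [h5]
  have h6 : (List.range' 0 (l1.length+1)).map (fun (c : Nat) => (c:Int)) = pvRow l1 l2 0 := by
    rw [pvRow]; exact List.map_congr_left (fun a _ => by simp [pvCell])
  rw [h6]
  have h7 := pv_outer l1 l2 l2.length 0 (by omega)
  simp only [Nat.zero_add] at h7
  rw [show pvRow l1 l2 0 :: (List.range' 1 l2.length).map (fun (b : Nat) => (b:Int) :: List.replicate l1.length 0)
        = (List.range' 0 1).map (pvRow l1 l2) ++ (List.range' 1 l2.length).map (fun (b : Nat) => (b:Int) :: List.replicate l1.length 0) by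
        simp [List.range'_one]]
  rw [h7]
  rw [pv_getD_map_range' _ _ _ _ (by omega),
      show pvRow l1 l2 l2.length = (List.range' 0 (l1.length+1)).map (pvCell l1 l2 l2.length) from rfl,
      pv_getD_map_range' _ _ _ _ (by omega)]

-- ===== B-side lemmas =====

-- lower bound: a DP cell is at least the length difference of its prefixes
theorem pvCell_lb (l1 l2 : List Char) :
    ∀ (i j : Nat), (i : Int) - (j : Int) ≤ pvCell l1 l2 i j ∧ (j : Int) - (i : Int) ≤ pvCell l1 l2 i j := by
  intro i
  induction i with
  | zero => intro j; simp [pvCell]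
  | succ i ih =>
    intro j
    induction j with
    | zero => simp [pvCell]; omega
    | succ j ihj =>
      obtain ⟨a1, a2⟩ := ih j
      obtain ⟨b1, b2⟩ := ih (j+1)
      obtain ⟨c1, c2⟩ := ihj
      rw [pvCell]
      constructor <;> (simp only [le_min_iff]; split_ifs <;> (push_cast at * ; omega))

-- one-step upper bounds straight from the recurrence
theorem pvCell_le_up (l1 l2 : List Char) (i j : Nat) :
    pvCell l1 l2 (i+1) (j+1) ≤ pvCell l1 l2 i (j+1) + 1 := by
  conv_lhs => rw [pvCell]
  exact min_le_right _ _

theorem pvCell_le_left (l1 l2 : List Char) (i j : Nat) :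
    pvCell l1 l2 (i+1) (j+1) ≤ pvCell l1 l2 (i+1) j + 1 := by
  conv_lhs => rw [pvCell]
  exact (min_le_left _ _).trans (min_le_right _ _)

-- adjacent cells differ by at most one (the two non-trivial directions)
theorem pvCell_succ_right_ge (l1 l2 : List Char) :
    ∀ i j, pvCell l1 l2 i j ≤ pvCell l1 l2 i (j+1) + 1 := by
  intro i
  induction i with
  | zero => intro j; simp [pvCell]; omega
  | succ i ih =>
    intro j
    cases j with
    | zero =>
      have := (pvCell_lb l1 l2 (i+1) 1).1
      rw [pvCell_zero_right]
      push_cast at *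
      omega
    | succ j =>
      have h1 := pvCell_le_up l1 l2 i j
      have h2 := ih (j+1)
      conv_rhs => rw [pvCell]
      simp only [← min_add_add_right, le_min_iff]
      refine ⟨⟨?_, ?_⟩, ?_⟩
      · split_ifs <;> omega
      · omega
      · omega

theorem pvCell_succ_left_ge (l1 l2 : List Char) :
    ∀ j i, pvCell l1 l2 i j ≤ pvCell l1 l2 (i+1) j + 1 := by
  intro j
  induction j with
  | zero => intro i; rw [pvCell_zero_right, pvCell_zero_right]; push_cast; omega
  | succ j ih =>
    intro i
    cases i with
    | zero =>
      have := (pvCell_lb l1 l2 1 (j+1)).2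
      rw [pvCell_zero_left]
      push_cast at *
      omega
    | succ i =>
      have h1 := pvCell_le_left l1 l2 i j
      have h2 := ih (i+1)
      conv_rhs => rw [pvCell]
      simp only [← min_add_add_right, le_min_iff]
      refine ⟨⟨?_, ?_⟩, ?_⟩
      · split_ifs <;> omega
      · omega
      · omega

-- equal last characters: the diagonal wins outright
theorem pvCell_diag (l1 l2 : List Char) (i j : Nat)
    (h : l1.getD j default = l2.getD i default) :
    pvCell l1 l2 (i+1) (j+1) = pvCell l1 l2 i j := by
  apply le_antisymm
  · conv_lhs => rw [pvCell]
    refine (min_le_left _ _).trans ((min_le_left _ _).trans ?_)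
    rw [if_pos h]; omega
  · conv_rhs => rw [pvCell]
    refine le_min (le_min ?_ ?_) ?_
    · rw [if_pos h]; omega
    · have := pvCell_succ_left_ge l1 l2 j i; omega
    · have := pvCell_succ_right_ge l1 l2 i j; omega

-- the suffix-strip loop preserves the DP cell
theorem pvStrip_cell (l1 l2 : List Char) :
    ∀ i j, pvCell l1 l2 (pvStrip l1 l2 i j).2 (pvStrip l1 l2 i j).1 = pvCell l1 l2 j i := by
  intro i
  induction i with
  | zero => intro j; simp [pvStrip]
  | succ i ih =>
    intro j
    cases j with
    | zero => simp [pvStrip]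
    | succ j =>
      simp only [pvStrip]
      split_ifs with h
      · rw [ih j, pvCell_diag l1 l2 j i h]
      · rfl

-- when the strip loop stops with both indices positive, the last characters differ
theorem pvStrip_ne (l1 l2 : List Char) :
    ∀ i j, (pvStrip l1 l2 i j).1 = 0 ∨ (pvStrip l1 l2 i j).2 = 0 ∨
      l1.getD ((pvStrip l1 l2 i j).1 - 1) default ≠ l2.getD ((pvStrip l1 l2 i j).2 - 1) default := by
  intro i
  induction i with
  | zero => intro j; simp [pvStrip]
  | succ i ih =>
    intro j
    cases j with
    | zero => simp [pvStrip]
    | succ j =>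
      simp only [pvStrip]
      split_ifs with h
      · exact ih j
      · simpa using h

-- correctness of the budgeted recursion against the DP cell
theorem pvWithin_iff (l1 l2 : List Char) :
    ∀ (N i j : Nat) (k : Int), i + j ≤ N → 0 ≤ k →
      (pvWithin l1 l2 i j k = true ↔ pvCell l1 l2 j i ≤ k) := by
  intro N
  induction N with
  | zero =>
    intro i j k hN hk
    have hi : i = 0 := by omega
    have hj : j = 0 := by omega
    subst hi; subst hj
    rw [pvWithin]
    simp [pvStrip, pvCell, hk]
  | succ N ih =>
    intro i j k hN hk
    rw [pvWithin, ← pvStrip_cell l1 l2 i j]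
    have hle := pvStrip_le l1 l2 i j
    set p := pvStrip l1 l2 i j with hp
    by_cases h1 : p.1 = 0
    · rw [if_pos h1, h1, pvCell_zero_right]
      simp
    · rw [if_neg h1]
      by_cases h2 : p.2 = 0
      · rw [if_pos h2, h2]
        obtain ⟨I, hI⟩ := Nat.exists_eq_succ_of_ne_zero h1
        rw [hI, pvCell_zero_left]
        simp
      · rw [if_neg h2]
        obtain ⟨I, hI⟩ := Nat.exists_eq_succ_of_ne_zero h1
        obtain ⟨J, hJ⟩ := Nat.exists_eq_succ_of_ne_zero h2
        have e1 : p.1 - 1 = I := by omega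
        have e2 : p.2 - 1 = J := by omega
        have hne : l1.getD (p.1 - 1) default ≠ l2.getD (p.2 - 1) default := by
          rcases pvStrip_ne l1 l2 i j with h | h | h
          · exact absurd h h1
          · exact absurd h h2
          · exact h
        rw [e1, e2] at hne
        have hcell : pvCell l1 l2 (J+1) (I+1)
            = min (min (pvCell l1 l2 J I + 1) (pvCell l1 l2 (J+1) I + 1)) (pvCell l1 l2 J (I+1) + 1) := by
          rw [pvCell, if_neg (fun hc => hne hc)]
        have lb1 := pvCell_lb l1 l2 J I
        have lb2 := pvCell_lb l1 l2 (J+1) I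
        have lb3 := pvCell_lb l1 l2 J (I+1)
        by_cases hk0 : k = 0
        · rw [if_pos hk0, hk0]
          simp only [hI, hJ, Nat.succ_eq_add_one]
          rw [hcell]
          simp only [false_iff, Bool.false_eq_true]
          simp only [min_le_iff]
          push_cast at lb1 lb2 lb3 ⊢
          omega
        · rw [if_neg hk0]
          have hk1 : 0 ≤ k - 1 := by omega
          have i1 := ih (p.1 - 1) (p.2 - 1) (k-1) (by omega) hk1
          have i2 := ih p.1 (p.2 - 1) (k-1) (by omega) hk1
          have i3 := ih (p.1 - 1) p.2 (k-1) (by omega) hk1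
          simp only [e1, e2] at i1 i2 i3 ⊢
          simp only [hI, hJ, Nat.succ_eq_add_one] at i1 i2 i3 ⊢
          rw [hcell]
          simp only [Bool.or_eq_true, i1, i2, i3, min_le_iff]
          omega

-- B's program computes the same final test
theorem corretor_alt_eq_cell (s1 s2 : String) :
    corretor_alt s1 s2 =
      if pvCell s1.toList s2.toList s2.toList.length s1.toList.length ≤ 2 then s2 ++ " " else "" := by
  simp only [corretor_alt]
  set l1 := s1.toList
  set l2 := s2.toList
  by_cases hgap : 2 < ((l1.length : Int) - (l2.length : Int)).natAbs
  · rw [if_pos hgap]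
    have hlb := pvCell_lb l1 l2 l2.length l1.length
    rw [if_neg (by omega)]
  · rw [if_neg hgap]
    have hiff := pvWithin_iff l1 l2 (l1.length + l2.length) l1.length l2.length 2 (le_refl _) (by omega)
    simp only [hiff]

-- ===== VERDICT (by name: the statement is the Claim_ definition above) =====
theorem corretor_spec : Claim_equal_corretor := by
  intro s1 s2 _ _
  unfold Spec_corretor
  rw [corretor_eq_cell, corretor_alt_eq_cell]
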